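-- pv_equiv track=rewrite | github.com/blakechasteen/hello-world | archive/narrative_experiments/piercing_sentiment_final.py | _predict_narrative_arc
-- ===== SOURCE A (Python) =====
-- from typing import Dict, List, Tuple, Optional, Any
--
-- def _predict_narrative_arc(text: str) -> Optional[str]:
--     """Predict which narrative arc this text represents"""
--     arc_patterns = {
--         "invocation": ["call", "destiny", "gods", "divine", "begin", "summon", "invoke"],
--         "departure": ["leave", "journey", "start", "threshold", "cross", "venture", "depart"],
--         "trials": ["test", "challenge", "trial", "struggle", "endure", "overcome", "suffer"],
--         "wandering": ["lost", "search", "wander", "drift", "explore", "distant", "roam"],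
--         "recognition": ["know", "recognize", "reveal", "identity", "truth", "see", "realize"],
--         "resolution": ["home", "return", "end", "complete", "peace", "fulfill", "resolve"]
--     }
--
--     words = text.lower().split()
--     arc_scores = {}
--
--     for arc, patterns in arc_patterns.items():
--         score = sum(1 for word in words if any(pattern in word for pattern in patterns))
--         arc_scores[arc] = score
--
--     if max(arc_scores.values()) > 0:
--         return max(arc_scores.keys(), key=lambda k: arc_scores[k])
--     return None
-- ===== SOURCE B (Python) =====
-- from typing import Optional
--
-- def _predict_narrative_arc(text: str) -> Optional[str]:
--     """Predict which narrative arc this text represents.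
--
--     Instead of testing every pattern against every word, build a hash index
--     pattern -> arc position once, and for each word enumerate its substrings
--     and look them up: the inner scan over the 42 patterns disappears.
--     """
--     arcs = ["invocation", "departure", "trials", "wandering", "recognition", "resolution"]
--     pattern_lists = [
--         ["call", "destiny", "gods", "divine", "begin", "summon", "invoke"],
--         ["leave", "journey", "start", "threshold", "cross", "venture", "depart"],
--         ["test", "challenge", "trial", "struggle", "endure", "overcome", "suffer"],
--         ["lost", "search", "wander", "drift", "explore", "distant", "roam"],
--         ["know", "recognize", "reveal", "identity", "truth", "see", "realize"],
--         ["home", "return", "end", "complete", "peace", "fulfill", "resolve"],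
--     ]
--     pattern_arc = {p: k for k, pats in enumerate(pattern_lists) for p in pats}
--     maxlen = max(map(len, pattern_arc))
--
--     scores = [0] * 6
--     for word in text.lower().split():
--         hit = set()
--         n = len(word)
--         for i in range(n):
--             for j in range(i + 1, min(n, i + maxlen) + 1):
--                 k = pattern_arc.get(word[i:j])
--                 if k is not None:
--                     hit.add(k)
--         scores = [s + (1 if k in hit else 0) for k, s in enumerate(scores)]
--
--     best, best_score = None, 0
--     for arc, s in zip(arcs, scores):
--         if s > best_score:
--             best, best_score = arc, s
--     return best
-- ===== Notes on version B (the rewrite author's own statement) =====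
-- stated objective: alternative
-- what changed: B inverts the matching: instead of running a substring test of each of the 42 patterns against each word in six separate per-arc scans, it builds a hash index from pattern to arc position once, enumerates each word's substrings of length up to the longest pattern and looks them up in the dict to collect the set of arcs the word hits, accumulating all six scores in one pass and picking the first strictly-improving arc (equals A's first-maximal-arc-if-positive rule).
import Mathlib
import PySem

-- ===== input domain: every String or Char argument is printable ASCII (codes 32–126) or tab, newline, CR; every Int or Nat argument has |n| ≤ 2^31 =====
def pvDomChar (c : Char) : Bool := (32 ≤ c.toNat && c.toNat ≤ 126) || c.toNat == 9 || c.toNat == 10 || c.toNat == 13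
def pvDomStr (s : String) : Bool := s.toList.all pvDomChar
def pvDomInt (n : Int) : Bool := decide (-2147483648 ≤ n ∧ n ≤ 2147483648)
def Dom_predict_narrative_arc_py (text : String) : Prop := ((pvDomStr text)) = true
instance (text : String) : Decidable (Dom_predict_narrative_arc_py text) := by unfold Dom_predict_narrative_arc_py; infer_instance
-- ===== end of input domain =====

-- B replaces A's pattern-by-pattern matching (42 'pattern in word' tests per word) by a hash
-- index pattern -> arc position built once: each word's substrings of length up to the longest
-- pattern are enumerated and looked up in the dict, so the inner scan over the patterns
-- disappears (objective: alternative).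

-- the six pattern lists of the fixed arc_patterns table, identical in both Pythons
def pvPats1 : List String := ["call", "destiny", "gods", "divine", "begin", "summon", "invoke"]
def pvPats2 : List String := ["leave", "journey", "start", "threshold", "cross", "venture", "depart"]
def pvPats3 : List String := ["test", "challenge", "trial", "struggle", "endure", "overcome", "suffer"]
def pvPats4 : List String := ["lost", "search", "wander", "drift", "explore", "distant", "roam"]
def pvPats5 : List String := ["know", "recognize", "reveal", "identity", "truth", "see", "realize"]
def pvPats6 : List String := ["home", "return", "end", "complete", "peace", "fulfill", "resolve"]

def pvArcPatterns : List (String × List String) :=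
  [("invocation", pvPats1), ("departure", pvPats2), ("trials", pvPats3),
   ("wandering", pvPats4), ("recognition", pvPats5), ("resolution", pvPats6)]

-- any(pattern in word for pattern in patterns) — A's matching test
def pvHit (patterns : List String) (word : String) : Bool :=
  patterns.any (fun pattern => PySem.Str.isIn pattern word)

-- ===== PORT A =====
def predict_narrative_arc_py (text : String) : Option String :=
  let words := PySem.Str.split₀ (PySem.Str.lower text)
  -- for arc, patterns in arc_patterns.items(): arc_scores[arc] = sum(1 for word in words if any(...))
  let arc_scores :=
    pvArcPatterns.foldl
      (fun d ap =>
        d.insert ap.1 (words.foldl (fun acc word => if pvHit ap.2 word then acc + 1 else acc) (0 : Int)))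
      PySem.Dict.empty
  -- if max(arc_scores.values()) > 0: return max(arc_scores.keys(), key=lambda k: arc_scores[k])
  match PySem.List.max? arc_scores.values (fun v => v) with
  | some m =>
      if m > 0 then PySem.List.max? arc_scores.keys (fun k => arc_scores.getD k 0) else none
  | none => none  -- unreachable: arc_scores always has six entries

-- ===== PORT B =====
def pvArcs : List String :=
  ["invocation", "departure", "trials", "wandering", "recognition", "resolution"]

def pvPatLists : List (List String) := [pvPats1, pvPats2, pvPats3, pvPats4, pvPats5, pvPats6]

-- pattern_arc = {p: k for k, pats in enumerate(pattern_lists) for p in pats}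
def pvPatternArc : PySem.Dict String Int :=
  (PySem.List.enumerate pvPatLists).foldl
    (fun d kp => kp.2.foldl (fun d p => d.insert p kp.1) d) PySem.Dict.empty

-- maxlen = max(map(len, pattern_arc)) — substrings longer than this cannot be patterns
def pvMaxLen : Int :=
  match PySem.List.max? (pvPatternArc.keys.map (fun p => (PySem.Str.len p : Int))) (fun v => v) with
  | some m => m
  | none => 0

-- the hit set of one word: every substring word[i:j] of pattern length is looked up in the index
def pvHitSet (word : String) : PySem.Set Int :=
  let n : Int := PySem.Str.len word
  (PySem.List.pyRange 0 n 1).foldl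
    (fun h i =>
      (PySem.List.pyRange (i + 1) (min n (i + pvMaxLen) + 1) 1).foldl
        (fun h j =>
          match pvPatternArc.get? (PySem.Str.slice word (some i) (some j)) with
          | some k => PySem.Set.add h k
          | none => h) h)
    PySem.Set.empty

-- scores = [s + (1 if k in hit else 0) for k, s in enumerate(scores)]
def pvStepB (scores : List Int) (word : String) : List Int :=
  let hit := pvHitSet word
  (PySem.List.enumerate scores).map
    (fun ks => ks.2 + (if PySem.Set.contains hit ks.1 then (1 : Int) else 0))

def predict_narrative_arc_py_alt (text : String) : Option String :=
  let scores :=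
    (PySem.Str.split₀ (PySem.Str.lower text)).foldl pvStepB (List.replicate 6 (0 : Int))
  -- for arc, s in zip(arcs, scores): if s > best_score: best, best_score = arc, s
  let r :=
    (pvArcs.zip scores).foldl
      (fun best aps => if aps.2 > best.2 then (some aps.1, aps.2) else best)
      ((none : Option String), (0 : Int))
  r.1

-- ===== PRECONDITION & SPEC =====
def Spec_predict_narrative_arc_py (text : String) (out : Option String) : Prop := out = predict_narrative_arc_py_alt text
instance (text : String) (out : Option String) : Decidable (Spec_predict_narrative_arc_py text out) := by unfold Spec_predict_narrative_arc_py; infer_instance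

-- ===== CLAIM (what is proved, stated in full; the proofs are below) =====
def Claim_equal_predict_narrative_arc_py : Prop := ∀ (text : String), Dom_predict_narrative_arc_py text → Spec_predict_narrative_arc_py text (predict_narrative_arc_py text)

-- ===== LEMMAS AND PROOFS =====

-- membership through a fold that conditionally adds to a Set
theorem pvMemFold {α : Type} (l : List α) (g : PySem.Set Int → α → PySem.Set Int)
    (P : α → Prop) (k : Int) (hg : ∀ s a, k ∈ g s a ↔ k ∈ s ∨ P a) (s : PySem.Set Int) :
    k ∈ l.foldl g s ↔ k ∈ s ∨ ∃ a ∈ l, P a := by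
  induction l generalizing s with
  | nil => simp
  | cons x l ih =>
      rw [List.foldl_cons, ih, hg]
      constructor
      · rintro (( h | h) | ⟨a, ha, hp⟩)
        · exact Or.inl h
        · exact Or.inr ⟨x, by simp, h⟩
        · exact Or.inr ⟨a, by simp [ha], hp⟩
      · rintro (h | ⟨a, ha, hp⟩)
        · exact Or.inl (Or.inl h)
        · rcases List.mem_cons.mp ha with rfl | ha
          · exact Or.inl (Or.inr hp)
          · exact Or.inr ⟨a, ha, hp⟩

theorem pvMemAddOpt (k : Int) (s : PySem.Set Int) (o : Option Int) :
    k ∈ (match o with | some v => PySem.Set.add s v | none => s) ↔ k ∈ s ∨ o = some k := by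
  cases o with
  | none => simp
  | some v =>
      simp only [PySem.Set.mem_add, Option.some.injEq]
      constructor
      · rintro (h | rfl); exact Or.inl h; exact Or.inr rfl
      · rintro (h | rfl); exact Or.inl h; exact Or.inr rfl

-- membership in the hit set = some substring of the word maps to k in the index
theorem pvMemHitSet (word : String) (k : Int) :
    k ∈ pvHitSet word ↔
      ∃ i ∈ PySem.List.pyRange 0 (PySem.Str.len word) 1,
        ∃ j ∈ PySem.List.pyRange (i + 1) (min (PySem.Str.len word : Int) (i + pvMaxLen) + 1) 1,
          pvPatternArc.get? (PySem.Str.slice word (some i) (some j)) = some k := by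
  unfold pvHitSet
  rw [pvMemFold _ _ (fun i => ∃ j ∈ PySem.List.pyRange (i + 1) (min (PySem.Str.len word : Int) (i + pvMaxLen) + 1) 1,
        pvPatternArc.get? (PySem.Str.slice word (some i) (some j)) = some k) k
      (fun s i => by
        rw [pvMemFold _ _ (fun j =>
          pvPatternArc.get? (PySem.Str.slice word (some i) (some j)) = some k) k
          (fun s j => pvMemAddOpt k s _) s])]
  simp

def pvItemsLit : List (String × Int) :=
  [("call",0),("destiny",0),("gods",0),("divine",0),("begin",0),("summon",0),("invoke",0),
   ("leave",1),("journey",1),("start",1),("threshold",1),("cross",1),("venture",1),("depart",1),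
   ("test",2),("challenge",2),("trial",2),("struggle",2),("endure",2),("overcome",2),("suffer",2),
   ("lost",3),("search",3),("wander",3),("drift",3),("explore",3),("distant",3),("roam",3),
   ("know",4),("recognize",4),("reveal",4),("identity",4),("truth",4),("see",4),("realize",4),
   ("home",5),("return",5),("end",5),("complete",5),("peace",5),("fulfill",5),("resolve",5)]

set_option maxRecDepth 10000 in
theorem pvItems : pvPatternArc.items = pvItemsLit := by decide

set_option maxRecDepth 10000 in
theorem pvMaxLen_eq : pvMaxLen = 9 := by decide

set_option maxRecDepth 10000 in
theorem pvGetArc (s : String) (k : Int) :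
    pvPatternArc.get? s = some k ↔ (s, k) ∈ pvPatternArc.items :=
  PySem.Dict.get?_eq_some_iff_mem_items pvPatternArc s k (by decide)

theorem pvSliceInfix (word p : String) (hp : p.toList ≠ []) (hp9 : p.toList.length ≤ 9) :
    (∃ i ∈ PySem.List.pyRange 0 (PySem.Str.len word) 1,
       ∃ j ∈ PySem.List.pyRange (i + 1) (min (PySem.Str.len word : Int) (i + 9) + 1) 1,
         PySem.Str.slice word (some i) (some j) = p)
    ↔ p.toList <:+: word.toList := by
  constructor
  · rintro ⟨i, hi, j, hj, hslice⟩
    rw [PySem.List.mem_pyRange_one] at hi hj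
    obtain ⟨i, rfl⟩ : ∃ a : Nat, i = (a : Int) := ⟨i.toNat, (Int.toNat_of_nonneg hi.1).symm⟩
    obtain ⟨j, rfl⟩ : ∃ a : Nat, j = (a : Int) := ⟨j.toNat, (Int.toNat_of_nonneg (by omega)).symm⟩
    have h1 : (PySem.Str.slice word (some (i:Int)) (some (j:Int))).toList
        = (word.toList.drop i).take (j - i) := by
      simp [pysem, PySem.List.slice_natCast]
    rw [← String.toList_inj.mpr hslice, h1]
    exact ((word.toList.drop i).take_prefix (j-i)).isInfix.trans (word.toList.drop_suffix i).isInfix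
  · rintro ⟨s, t, h⟩
    have hlen : (PySem.Str.len word : Int) = (word.toList.length : Int) := by
      simp [pysem, PySem.Str.len]
    have hple : 0 < p.length := by
      have := List.length_pos_iff.mpr hp
      simpa using this
    have hpl : p.toList.length = p.length := by simp
    refine ⟨(s.length : Int), ?_, ((s.length + p.toList.length : Nat) : Int), ?_, ?_⟩
    · rw [PySem.List.mem_pyRange_one, hlen, ← h]
      simp
      omega
    · rw [PySem.List.mem_pyRange_one, hlen, ← h]
      simp
      omega
    · apply String.toList_inj.mp
      have h1 : (PySem.Str.slice word (some (s.length:Int)) (some ((s.length + p.toList.length : Nat):Int))).toList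
          = (word.toList.drop s.length).take (s.length + p.toList.length - s.length) := by
        simp [pysem]
      rw [h1, ← h]
      simp

theorem pvContainsHitGen (word : String) (k : Int) (pats : List String)
    (hmem : ∀ s : String, ((s, k) ∈ pvPatternArc.items ↔ s ∈ pats))
    (hne : ∀ p ∈ pats, p.toList ≠ [] ∧ p.toList.length ≤ 9) :
    PySem.Set.contains (pvHitSet word) k = pvHit pats word := by
  apply Bool.eq_iff_iff.mpr
  rw [PySem.Set.contains_iff, pvMemHitSet]
  simp only [pvMaxLen_eq]
  have h2 : pvHit pats word = true ↔ ∃ p ∈ pats, PySem.Str.isIn p word = true := by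
    simp [pvHit]
  rw [h2]
  constructor
  · rintro ⟨i, hi, j, hj, hget⟩
    have hmemp := (hmem _).mp ((pvGetArc _ _).mp hget)
    exact ⟨_, hmemp, (PySem.Str.isIn_iff_infix _ _).mpr
      ((pvSliceInfix word _ (hne _ hmemp).1 (hne _ hmemp).2).mp ⟨i, hi, j, hj, rfl⟩)⟩
  · rintro ⟨p, hpm, hin⟩
    obtain ⟨i, hi, j, hj, hsl⟩ := (pvSliceInfix word p (hne p hpm).1 (hne p hpm).2).mpr
      ((PySem.Str.isIn_iff_infix _ _).mp hin)
    exact ⟨i, hi, j, hj, (pvGetArc _ _).mpr ((hmem _).mpr (hsl ▸ hpm))⟩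

theorem pvContainsHit1 (word : String) : PySem.Set.contains (pvHitSet word) 0 = pvHit pvPats1 word := by
  refine pvContainsHitGen word 0 pvPats1 (fun s => ?_) (by decide)
  rw [pvItems]; simp [pvItemsLit, pvPats1, Prod.ext_iff]
theorem pvContainsHit2 (word : String) : PySem.Set.contains (pvHitSet word) 1 = pvHit pvPats2 word := by
  refine pvContainsHitGen word 1 pvPats2 (fun s => ?_) (by decide)
  rw [pvItems]; simp [pvItemsLit, pvPats2, Prod.ext_iff]
theorem pvContainsHit3 (word : String) : PySem.Set.contains (pvHitSet word) 2 = pvHit pvPats3 word := by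
  refine pvContainsHitGen word 2 pvPats3 (fun s => ?_) (by decide)
  rw [pvItems]; simp [pvItemsLit, pvPats3, Prod.ext_iff]
theorem pvContainsHit4 (word : String) : PySem.Set.contains (pvHitSet word) 3 = pvHit pvPats4 word := by
  refine pvContainsHitGen word 3 pvPats4 (fun s => ?_) (by decide)
  rw [pvItems]; simp [pvItemsLit, pvPats4, Prod.ext_iff]
theorem pvContainsHit5 (word : String) : PySem.Set.contains (pvHitSet word) 4 = pvHit pvPats5 word := by
  refine pvContainsHitGen word 4 pvPats5 (fun s => ?_) (by decide)
  rw [pvItems]; simp [pvItemsLit, pvPats5, Prod.ext_iff]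
theorem pvContainsHit6 (word : String) : PySem.Set.contains (pvHitSet word) 5 = pvHit pvPats6 word := by
  refine pvContainsHitGen word 5 pvPats6 (fun s => ?_) (by decide)
  rw [pvItems]; simp [pvItemsLit, pvPats6, Prod.ext_iff]

theorem pvStepB_eval (s1 s2 s3 s4 s5 s6 : Int) (w : String) :
    pvStepB [s1, s2, s3, s4, s5, s6] w
    = [s1 + (if pvHit pvPats1 w then 1 else 0), s2 + (if pvHit pvPats2 w then 1 else 0),
       s3 + (if pvHit pvPats3 w then 1 else 0), s4 + (if pvHit pvPats4 w then 1 else 0),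
       s5 + (if pvHit pvPats5 w then 1 else 0), s6 + (if pvHit pvPats6 w then 1 else 0)] := by
  show [s1 + (if PySem.Set.contains (pvHitSet w) 0 then (1:Int) else 0),
        s2 + (if PySem.Set.contains (pvHitSet w) 1 then (1:Int) else 0),
        s3 + (if PySem.Set.contains (pvHitSet w) 2 then (1:Int) else 0),
        s4 + (if PySem.Set.contains (pvHitSet w) 3 then (1:Int) else 0),
        s5 + (if PySem.Set.contains (pvHitSet w) 4 then (1:Int) else 0),
        s6 + (if PySem.Set.contains (pvHitSet w) 5 then (1:Int) else 0)] = _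
  rw [pvContainsHit1, pvContainsHit2, pvContainsHit3, pvContainsHit4, pvContainsHit5,
      pvContainsHit6]

-- arc score of one pattern list over a word list
def pvCnt (patterns : List String) (ws : List String) : Int := (ws.countP (pvHit patterns) : Int)

-- B's word loop accumulates all six counts at once
theorem pvB_loop (ws : List String) (s1 s2 s3 s4 s5 s6 : Int) :
    ws.foldl pvStepB [s1, s2, s3, s4, s5, s6]
    = [s1 + pvCnt pvPats1 ws, s2 + pvCnt pvPats2 ws, s3 + pvCnt pvPats3 ws,
       s4 + pvCnt pvPats4 ws, s5 + pvCnt pvPats5 ws, s6 + pvCnt pvPats6 ws] := by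
  induction ws generalizing s1 s2 s3 s4 s5 s6 with
  | nil => simp [pvCnt]
  | cons w ws ih =>
      rw [List.foldl_cons, pvStepB_eval, ih]
      simp only [pvCnt, List.countP_cons, List.cons.injEq, and_true]
      push_cast
      refine ⟨?_, ?_, ?_, ?_, ?_, ?_⟩ <;> (split_ifs <;> ring)

def pvMaxP (l : List (String × Int)) (a : String × Int) : String × Int :=
  l.foldl (fun m x => if m.2 < x.2 then x else m) a

theorem pvMaxP_snd (l : List (String × Int)) (a : String × Int) :
    (pvMaxP l a).2 = (l.map Prod.snd).foldl max a.2 := by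
  induction l generalizing a with
  | nil => rfl
  | cons x l ih =>
      simp only [pvMaxP, List.foldl_cons, List.map_cons] at *
      rw [ih]
      congr 1
      split_ifs <;> omega

theorem pvMaxP_le (l : List (String × Int)) (a : String × Int) : a.2 ≤ (pvMaxP l a).2 := by
  rw [pvMaxP_snd]
  exact (PySem.List.le_foldl_max (l.map Prod.snd) a.2).1

theorem pvMaxP_cases (l : List (String × Int)) (a : String × Int) :
    pvMaxP l a = a ∨ a.2 < (pvMaxP l a).2 := by
  induction l generalizing a with
  | nil => left; rfl
  | cons x l ih =>
      simp only [pvMaxP, List.foldl_cons] at *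
      split_ifs with h
      · right
        exact lt_of_lt_of_le h (pvMaxP_le l x)
      · exact ih a

theorem pvMax?_cons {α κ : Type} [LinearOrder κ] (x : α) (xs : List α) (key : α → κ) :
    PySem.List.max? (x :: xs) key
      = some (xs.foldl (fun m y => if key m < key y then y else m) x) := by
  simp only [PySem.List.max?, List.foldl_cons]
  induction xs generalizing x with
  | nil => rfl
  | cons y ys ih =>
      simp only [List.foldl_cons]
      rw [← ih]
      split_ifs <;> rfl

theorem pvMaxP_map (ys : List String) (x : String) (key : String → Int) :
    pvMaxP (ys.map (fun k => (k, key k))) (x, key x)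
      = (ys.foldl (fun m y => if key m < key y then y else m) x,
         key (ys.foldl (fun m y => if key m < key y then y else m) x)) := by
  induction ys generalizing x with
  | nil => rfl
  | cons y ys ih =>
      simp only [pvMaxP, List.map_cons, List.foldl_cons] at *
      split_ifs with h
      · exact ih y
      · exact ih x

theorem pvFoldB (l : List (String × Int)) (b : Option String) (s : Int) (d : String) :
    l.foldl (fun best aps => if aps.2 > best.2 then (some aps.1, aps.2) else best) (b, s)
      = if (pvMaxP l (d, s)).2 > s then (some (pvMaxP l (d, s)).1, (pvMaxP l (d, s)).2)
        else (b, s) := by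
  induction l generalizing b s d with
  | nil => simp [pvMaxP]
  | cons x l ih =>
      simp only [List.foldl_cons]
      by_cases h : s < x.2
      · have hrx : pvMaxP (x :: l) (d, s) = pvMaxP l x := by
          simp [pvMaxP, List.foldl_cons, h]
        rw [show (if x.2 > (b, s).2 then (some x.1, x.2) else (b, s)) = ((some x.1 : Option String), x.2) from by simp [h]]
        rw [ih (some x.1) x.2 x.1, hrx, Prod.mk.eta]
        rcases pvMaxP_cases l x with hc | hc
        · rw [hc]; simp [h]
        · rw [if_pos hc, if_pos (lt_trans h hc)]
      · have hrx : pvMaxP (x :: l) (d, s) = pvMaxP l (d, s) := by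
          simp [pvMaxP, List.foldl_cons, h]
        rw [show (if x.2 > (b, s).2 then (some x.1, x.2) else (b, s)) = (b, s) from by simp [h]]
        rw [ih b s d, hrx]

-- the two final selections agree for any six nonnegative scores
theorem pvSel (c1 c2 c3 c4 c5 c6 : Int) (h1 : 0 ≤ c1) :
    (match PySem.List.max?
        ((((((PySem.Dict.empty.insert "invocation" c1).insert "departure" c2).insert "trials"
            c3).insert "wandering" c4).insert "recognition" c5).insert "resolution" c6).values
        (fun v => v) with
     | some m =>
         if m > 0 then
           PySem.List.max?
             ((((((PySem.Dict.empty.insert "invocation" c1).insert "departure" c2).insert "trials"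
                 c3).insert "wandering" c4).insert "recognition" c5).insert "resolution" c6).keys
             (fun k =>
               ((((((PySem.Dict.empty.insert "invocation" c1).insert "departure" c2).insert "trials"
                   c3).insert "wandering" c4).insert "recognition" c5).insert "resolution"
                 c6).getD k 0)
         else none
     | none => (none : Option String))
    = ((pvArcs.zip [c1, c2, c3, c4, c5, c6]).foldl
        (fun best aps => if aps.2 > best.2 then (some aps.1, aps.2) else best)
        ((none : Option String), (0 : Int))).1 := by
  have hvals : ((((((PySem.Dict.empty.insert "invocation" c1).insert "departure" c2).insert "trials"
      c3).insert "wandering" c4).insert "recognition" c5).insert "resolution" c6).values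
      = [c1, c2, c3, c4, c5, c6] := rfl
  have hkeys : ((((((PySem.Dict.empty.insert "invocation" c1).insert "departure" c2).insert "trials"
      c3).insert "wandering" c4).insert "recognition" c5).insert "resolution" c6).keys
      = ["invocation", "departure", "trials", "wandering", "recognition", "resolution"] := rfl
  rw [hvals, hkeys, pvMax?_cons, pvMax?_cons]
  have hmaxfun : (fun (m y : Int) => if (fun v => v) m < (fun v => v) y then y else m)
      = fun m y => max m y := by
    funext m y
    simp only [max_def]
    split_ifs <;> omega
  have hkeymap := pvMaxP_map ["departure", "trials", "wandering", "recognition", "resolution"]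
    "invocation"
    (fun k =>
      ((((((PySem.Dict.empty.insert "invocation" c1).insert "departure" c2).insert "trials"
          c3).insert "wandering" c4).insert "recognition" c5).insert "resolution" c6).getD k 0)
  have hmapeval : (["departure", "trials", "wandering", "recognition", "resolution"].map
      (fun k => (k,
        ((((((PySem.Dict.empty.insert "invocation" c1).insert "departure" c2).insert "trials"
            c3).insert "wandering" c4).insert "recognition" c5).insert "resolution" c6).getD k 0)))
      = [("departure", c2), ("trials", c3), ("wandering", c4), ("recognition", c5),
         ("resolution", c6)] := rfl
  rw [hmapeval] at hkeymap
  have hB : ((pvArcs.zip [c1, c2, c3, c4, c5, c6]).foldl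
        (fun best aps => if aps.2 > best.2 then (some aps.1, aps.2) else best)
        ((none : Option String), (0 : Int)))
      = ([("invocation", c1), ("departure", c2), ("trials", c3), ("wandering", c4),
          ("recognition", c5), ("resolution", c6)].foldl
          (fun best aps => if aps.2 > best.2 then (some aps.1, aps.2) else best)
          ((none : Option String), (0 : Int))) := rfl
  rw [hB, pvFoldB _ none 0 "invocation"]
  set l5 : List (String × Int) := [("departure", c2), ("trials", c3), ("wandering", c4),
    ("recognition", c5), ("resolution", c6)] with hl5
  have hfold1 : List.foldl
      (fun m y =>
        if ((((((PySem.Dict.empty.insert "invocation" c1).insert "departure" c2).insert "trials"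
                c3).insert "wandering" c4).insert "recognition" c5).insert "resolution" c6).getD m 0
            < ((((((PySem.Dict.empty.insert "invocation" c1).insert "departure" c2).insert "trials"
                c3).insert "wandering" c4).insert "recognition" c5).insert "resolution"
                c6).getD y 0 then y else m)
      "invocation" ["departure", "trials", "wandering", "recognition", "resolution"]
      = (pvMaxP l5 ("invocation", c1)).1 := (congrArg Prod.fst hkeymap).symm
  have hstep : pvMaxP (("invocation", c1) :: l5) ("invocation", (0 : Int))
      = if (0 : Int) < c1 then pvMaxP l5 ("invocation", c1) else pvMaxP l5 ("invocation", 0) := by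
    simp only [pvMaxP, List.foldl_cons]
    split_ifs <;> rfl
  have hsnd : (pvMaxP l5 ("invocation", c1)).2
      = List.foldl (fun m y => max m y) c1 [c2, c3, c4, c5, c6] := by
    rw [pvMaxP_snd]; rfl
  simp only [hmaxfun]
  rcases lt_or_ge 0 c1 with hc | hc
  · rw [hstep, if_pos hc]
    have hpos : (0 : Int) < (pvMaxP l5 ("invocation", c1)).2 :=
      lt_of_lt_of_le hc (pvMaxP_le l5 ("invocation", c1))
    have hposM : (0 : Int) < List.foldl (fun m y => max m y) c1 [c2, c3, c4, c5, c6] := by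
      rw [← hsnd]; exact hpos
    simp only [gt_iff_lt]
    rw [if_pos hpos, if_pos hposM, hfold1]
  · have hc0 : c1 = 0 := le_antisymm hc h1
    subst hc0
    rw [hstep, if_neg (lt_irrefl 0)]
    simp only [gt_iff_lt]
    by_cases hpos : (0 : Int) < (pvMaxP l5 ("invocation", (0 : Int))).2
    · rw [if_pos hpos, if_pos (by rw [← hsnd]; exact hpos), hfold1]
    · rw [if_neg hpos, if_neg (by rw [← hsnd]; exact hpos)]

-- ===== VERDICT (by name: the statement is the Claim_ definition above) =====
theorem predict_narrative_arc_py_spec : Claim_equal_predict_narrative_arc_py := by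
  intro text _
  unfold Spec_predict_narrative_arc_py predict_narrative_arc_py predict_narrative_arc_py_alt
  have hrep : List.replicate 6 (0 : Int) = [0, 0, 0, 0, 0, 0] := rfl
  rw [hrep, pvB_loop]
  simp only [pvArcPatterns, List.foldl_cons, List.foldl_nil, PySem.List.foldl_if_add_one,
    zero_add]
  exact pvSel _ _ _ _ _ _ (Int.natCast_nonneg _)
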